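-- pv_equiv track=rewrite | github.com/Steci/Legacy-Project | src/parsers/gw/exporter.py | _escape_place_token
-- ===== SOURCE A (Python) =====
-- from typing import Dict, Iterable, List, Optional, Sequence, Set, Tuple
--
-- def _escape_place_token(token: str) -> str:
--     if not token:
--         return token
--     if "[" in token or "]" in token:
--         return token
--     pieces: List[str] = []
--     length = len(token)
--     for index, char in enumerate(token):
--         if char == "_":
--             prev_alnum = index > 0 and token[index - 1].isalnum()
--             next_alnum = index + 1 < length and token[index + 1].isalnum()
--             if prev_alnum and next_alnum:
--                 pieces.append("\\_")
--                 continue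
--         pieces.append(char)
--     return "".join(pieces)
-- ===== SOURCE B (Python) =====
-- def _escape_place_token(token: str) -> str:
--     if not token:
--         return token
--     if "[" in token or "]" in token:
--         return token
--     parts = token.split("_")
--     out = [parts[0]]
--     for left, right in zip(parts, parts[1:]):
--         if left and left[-1].isalnum() and right and right[0].isalnum():
--             out.append("\\_")
--         else:
--             out.append("_")
--         out.append(right)
--     return "".join(out)
-- ===== Notes on version B (the rewrite author's own statement) =====
-- stated objective: faster
-- what changed: B splits the token into underscore-free segments with str.split and reassembles them, choosing the escaped or plain separator per boundary from the last char of the left segment and first char of the right segment, instead of A's per-character scan with indexed neighbour lookups; bulk slice/join work replaces per-character Python-level loop iterations.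
import Mathlib
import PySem

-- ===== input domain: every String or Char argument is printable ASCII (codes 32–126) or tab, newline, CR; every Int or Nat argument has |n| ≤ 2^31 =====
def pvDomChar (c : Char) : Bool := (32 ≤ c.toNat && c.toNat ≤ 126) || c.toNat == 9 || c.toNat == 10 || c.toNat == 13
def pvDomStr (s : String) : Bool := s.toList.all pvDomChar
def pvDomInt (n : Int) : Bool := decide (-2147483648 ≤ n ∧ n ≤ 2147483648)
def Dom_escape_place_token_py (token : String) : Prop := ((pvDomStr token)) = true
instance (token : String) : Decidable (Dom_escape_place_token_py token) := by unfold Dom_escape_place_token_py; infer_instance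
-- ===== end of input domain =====

-- B reassembles the segments of token.split('_') with a per-boundary separator instead of A's
-- per-character scan with indexed neighbour lookups (measurably faster in CPython: bulk split/join).

-- optAlnum o : Python's ''.isalnum() on a missing neighbour/empty segment (none) is False; on a
-- one-char string (some c) it is c.isalnum() — exact on the ASCII domain via PySem.Chars.isalnum.
def optAlnum : Option Char → Bool
  | some c => PySem.Chars.isalnum c
  | none => false

-- ===== PORT A =====
def escape_place_token_py (token : String) : String :=
  if token.toList.isEmpty then token
  else if PySem.Str.isIn "[" token || PySem.Str.isIn "]" token then token
  else
    let cs := token.toList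
    let length : Int := PySem.Str.len token
    -- for index, char in enumerate(token): append "\_" or the char to pieces
    -- (token[index-1]/token[index+1] are guarded in range, so pyGet? is some there)
    let pieces : List (List Char) :=
      (PySem.List.enumerate cs 0).foldl (fun acc ic =>
        if ic.2 == '_' then
          let prev_alnum := decide (0 < ic.1) && optAlnum (PySem.List.pyGet? cs (ic.1 - 1))
          let next_alnum := decide (ic.1 + 1 < length) && optAlnum (PySem.List.pyGet? cs (ic.1 + 1))
          if prev_alnum && next_alnum then acc ++ [['\\', '_']] else acc ++ [[ic.2]]
        else acc ++ [[ic.2]]) []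
    String.ofList (PySem.Chars.join [] pieces)

-- ===== PORT B =====
-- token.split("_") with a ONE-CHARACTER separator is exactly List.splitOn '_' on the char list.
def escape_place_token_py_alt (token : String) : String :=
  if token.toList.isEmpty then token
  else if PySem.Str.isIn "[" token || PySem.Str.isIn "]" token then token
  else
    let parts := token.toList.splitOn '_'
    -- out = [parts[0]]; for left, right in zip(parts, parts[1:]): out.append(sep); out.append(right)
    let out : List Char :=
      (parts.zip parts.tail).foldl (fun acc lr =>
        acc ++ ((if optAlnum lr.1.getLast? && optAlnum lr.2.head? then ['\\', '_'] else ['_']) ++ lr.2))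
        (parts.headD [])
    String.ofList out

-- ===== PRECONDITION & SPEC =====
def Spec_escape_place_token_py (token : String) (out : String) : Prop := out = escape_place_token_py_alt token
instance (token : String) (out : String) : Decidable (Spec_escape_place_token_py token out) := by unfold Spec_escape_place_token_py; infer_instance

-- ===== CLAIM (what is proved, stated in full; the proofs are below) =====
def Claim_equal_escape_place_token_py : Prop := ∀ (token : String), Dom_escape_place_token_py token → Spec_escape_place_token_py token (escape_place_token_py token)

-- ===== LEMMAS AND PROOFS =====

-- normal form shared by both proofs: pieces, one per char, carrying the previous char as context
def gp (p : Option Char) : List Char → List (List Char)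
  | [] => []
  | c :: rest =>
      (if c == '_' && optAlnum p && optAlnum rest.head? then ['\\', '_'] else [c]) :: gp (some c) rest

def pieceA (cs : List Char) (ic : Int × Char) : List Char :=
  if ic.2 == '_' then
    if (decide (0 < ic.1) && optAlnum (PySem.List.pyGet? cs (ic.1 - 1))) &&
       (decide (ic.1 + 1 < (cs.length : Int)) && optAlnum (PySem.List.pyGet? cs (ic.1 + 1))) then
      ['\\', '_']
    else [ic.2]
  else [ic.2]

theorem pieces_eq (cs : List Char) (h : cs ≠ []) :
    (PySem.List.enumerate cs 0).foldl (fun acc ic =>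
        if ic.2 == '_' then
          let prev_alnum := decide (0 < ic.1) && optAlnum (PySem.List.pyGet? cs (ic.1 - 1))
          let next_alnum := decide (ic.1 + 1 < (cs.length : Int)) && optAlnum (PySem.List.pyGet? cs (ic.1 + 1))
          if prev_alnum && next_alnum then acc ++ [['\\', '_']] else acc ++ [[ic.2]]
        else acc ++ [[ic.2]]) [] =
    (((((none : Option Char) :: cs.dropLast.map some).zip cs).zip (cs.tail.map some ++ [none])).map
      (fun pcn =>
        if pcn.1.2 == '_' && optAlnum pcn.1.1 && optAlnum pcn.2 then ['\\', '_']
        else [pcn.1.2])) := by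
  have hlen : 1 ≤ cs.length := by
    cases cs with
    | nil => exact absurd rfl h
    | cons a l => simp
  have hbody : (fun (acc : List (List Char)) (ic : Int × Char) =>
        if ic.2 == '_' then
          let prev_alnum := decide (0 < ic.1) && optAlnum (PySem.List.pyGet? cs (ic.1 - 1))
          let next_alnum := decide (ic.1 + 1 < (cs.length : Int)) && optAlnum (PySem.List.pyGet? cs (ic.1 + 1))
          if prev_alnum && next_alnum then acc ++ [['\\', '_']] else acc ++ [[ic.2]]
        else acc ++ [[ic.2]]) = (fun acc ic => acc ++ [pieceA cs ic]) := by
    funext acc ic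
    simp only [pieceA]
    split_ifs <;> rfl
  rw [hbody, PySem.List.foldl_append_singleton_eq_map]
  simp only [List.nil_append]
  apply List.ext_getElem
  · simp [PySem.List.length_enumerate]
    omega
  · intro k hk1 hk2
    have hk : k < cs.length := by
      simpa [PySem.List.length_enumerate] using hk1
    rw [List.getElem_map, List.getElem_map, PySem.List.getElem_enumerate, List.getElem_zip,
        List.getElem_zip]
    have hprev : (((none : Option Char) :: cs.dropLast.map some))[k]'(by simp; omega) =
        if hk0 : k = 0 then none else some (cs[k-1]'(by omega)) := by
      cases k with
      | zero => simp
      | succ j =>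
        simp only [List.getElem_cons_succ, List.getElem_map]
        rw [List.getElem_dropLast]
        simp
    have hnext : ((cs.tail.map some ++ [none]))[k]'(by simp; omega) =
        if hk1 : k + 1 < cs.length then some (cs[k+1]'(by omega)) else none := by
      by_cases hc : k + 1 < cs.length
      · rw [List.getElem_append_left (by simp; omega)]
        simp [List.getElem_tail, hc]
      · have : k = cs.length - 1 := by omega
        rw [List.getElem_append_right (by simp; omega)]
        simp [hc]
    rw [hprev, hnext]
    simp only [pieceA, Int.zero_add]
    by_cases hu : cs[k] = '_'
    · simp only [hu, beq_self_eq_true, if_true, Bool.true_and]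
      cases k with
      | zero => simp [optAlnum]
      | succ j =>
        have hget1 : PySem.List.pyGet? cs ((((j:Nat)+1 : Nat) : Int) - 1) = some (cs[j]'(by omega)) := by
          have : ((((j:Nat)+1 : Nat) : Int) - 1) = ((j : Nat) : Int) := by push_cast; ring
          rw [this, PySem.List.pyGet?_natCast]
          simp [List.getElem?_eq_getElem (by omega : j < cs.length)]
        rw [hget1]
        simp only [Nat.succ_sub_one, optAlnum]
        by_cases hc : j + 1 + 1 < cs.length
        · have hget2 : PySem.List.pyGet? cs ((((j:Nat)+1 : Nat) : Int) + 1) = some (cs[j+2]'(by omega)) := by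
            have : ((((j:Nat)+1 : Nat) : Int) + 1) = (((j+2 : Nat)) : Int) := by push_cast; ring
            rw [this, PySem.List.pyGet?_natCast]
            simp [List.getElem?_eq_getElem (by omega : j + 2 < cs.length)]
          rw [hget2]
          simp [hc, show j + 1 + 1 = j + 2 from rfl,
                show ((j:Int) + 1 + 1 < (cs.length:Int)) from by omega]
        · have hd2 : decide ((((j:Nat)+1 : Nat) : Int) + 1 < (cs.length : Int)) = false := by
            simp; omega
          simp [hc]
          intro _ habs
          exact absurd (by exact_mod_cast habs : j + 1 + 1 < cs.length) hc
    · simp [hu]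

-- the zip-of-shifted-neighbours form is the recursive normal form gp
theorem zip_eq_gp :
    ∀ (l : List Char) (p : Option Char),
      ((((p :: l.dropLast.map some).zip l).zip (l.tail.map some ++ [none])).map
        (fun pcn =>
          if pcn.1.2 == '_' && optAlnum pcn.1.1 && optAlnum pcn.2 then ['\\', '_']
          else [pcn.1.2])) = gp p l
  | [], p => by simp [gp]
  | c :: rest, p => by
    cases rest with
    | nil => simp [gp]
    | cons r rs =>
      have ih := zip_eq_gp (r :: rs) (some c)
      rw [gp, ← ih]
      simp

-- gp on an underscore-free list is just the chars themselves
theorem gp_no_underscore : ∀ (l : List Char), '_' ∉ l → ∀ p, gp p l = l.map (fun c => [c])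
  | [], _, _ => rfl
  | c :: t, h, p => by
    have hc : c ≠ '_' := fun hc => h (hc ▸ List.mem_cons_self)
    have ht : '_' ∉ t := fun m => h (List.mem_cons_of_mem _ m)
    simp [gp, hc, gp_no_underscore t ht (some c)]

theorem flatten_singletons : ∀ l : List Char, (l.map (fun c => [c])).flatten = l
  | [] => rfl
  | c :: t => by simp [flatten_singletons t]

theorem join_nil_flatten : ∀ ps : List (List Char), PySem.Chars.join [] ps = ps.flatten
  | [] => by simp [PySem.Chars.join_nil]
  | [a] => by simp [PySem.Chars.join_singleton]
  | a :: b :: r => by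
    rw [PySem.Chars.join_cons_cons, join_nil_flatten (b :: r)]
    simp

def lastO (p : Option Char) (l : List Char) : Option Char := (l.getLast?).or p

theorem gp_append : ∀ (l : List Char), '_' ∉ l → ∀ p r,
    gp p (l ++ r) = l.map (fun c => [c]) ++ gp (lastO p l) r
  | [], _, p, r => by simp [lastO]
  | c :: t, h, p, r => by
    have hc : c ≠ '_' := fun hc => h (hc ▸ List.mem_cons_self)
    have ht : '_' ∉ t := fun m => h (List.mem_cons_of_mem _ m)
    have hlast : lastO p (c :: t) = lastO (some c) t := by
      cases t with
      | nil => simp [lastO]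
      | cons b u =>
        cases hgl : (b :: u).getLast? with
        | some x => simp [lastO, List.getLast?_cons_cons, hgl]
        | none => simp [List.getLast?_eq_none_iff] at hgl
    by_cases hhead : (t ++ r).head? = some '_'
    all_goals
      simp [gp, hc, gp_append t ht (some c) r, hlast]

-- glue is ['_'].intercalate, written recursively
def glue : List (List Char) → List Char
  | [] => []
  | [a] => a
  | a :: b :: r => a ++ '_' :: glue (b :: r)

theorem glue_splitOn : ∀ cs : List Char, glue (cs.splitOn '_') = cs := by
  intro cs
  induction cs with
  | nil => rfl
  | cons c rest ih =>
    simp only [List.splitOn] at *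
    rw [List.splitOnP_cons]
    obtain ⟨h, t, hht⟩ := List.exists_cons_of_ne_nil (List.splitOnP_ne_nil (· == '_') rest)
    rw [hht] at ih
    by_cases hc : c = '_'
    · subst hc
      simp only [beq_self_eq_true, if_true, hht]
      show glue ([] :: h :: t) = '_' :: rest
      cases t with
      | nil => simpa [glue] using ih
      | cons b u => simp only [glue] at ih ⊢; simp [ih]
    · simp only [beq_iff_eq, hc, if_false, hht, List.modifyHead_cons]
      cases t with
      | nil => simpa [glue] using congrArg (c :: ·) ih
      | cons b u => simp only [glue] at ih ⊢; simp [ih]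

theorem no_underscore_splitOn (cs : List Char) : ∀ l ∈ cs.splitOn '_', '_' ∉ l := by
  induction cs with
  | nil => intro l hl; simp only [List.splitOn, List.splitOnP_nil, List.mem_singleton] at hl; simp [hl]
  | cons c rest ih =>
    intro l hl
    simp only [List.splitOn] at hl ih
    rw [List.splitOnP_cons] at hl
    by_cases hc : c = '_'
    · subst hc
      simp only [beq_self_eq_true, if_true, List.mem_cons] at hl
      rcases hl with rfl | hl
      · simp
      · exact ih l hl
    · simp only [beq_iff_eq, hc, if_false] at hl
      obtain ⟨h, t, hht⟩ := List.exists_cons_of_ne_nil (List.splitOnP_ne_nil (· == '_') rest)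
      rw [hht, List.modifyHead_cons, List.mem_cons] at hl
      rcases hl with rfl | hl
      · intro hm
        rcases List.mem_cons.mp hm with hu | hu
        · exact hc hu.symm
        · exact ih h (hht ▸ List.mem_cons_self) hu
      · exact ih l (hht ▸ List.mem_cons_of_mem _ hl)

theorem head_glue (q : List Char) (qs : List (List Char)) :
    optAlnum ((glue (q :: qs)).head?) = optAlnum q.head? := by
  cases qs with
  | nil => rfl
  | cons b u =>
    cases q with
    | nil => simp [glue, optAlnum, show PySem.Chars.isalnum '_' = false from by decide]
    | cons c t => simp [glue]

theorem lastO_alnum (p : Option Char) (part : List Char) (hp : part = [] → optAlnum p = false) :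
    optAlnum (lastO p part) = optAlnum part.getLast? := by
  cases hl : part.getLast? with
  | some c => simp [lastO, hl]
  | none =>
    have hpe : part = [] := by simpa using hl
    simpa [lastO, hl, optAlnum] using hp hpe

-- the key reassembly lemma: gp over the glued segments = first segment ++ boundary pieces
theorem gp_glue : ∀ (parts : List (List Char)) (part : List Char) (p : Option Char),
    '_' ∉ part → (∀ l ∈ parts, '_' ∉ l) → (part = [] → optAlnum p = false) →
    (gp p (glue (part :: parts))).flatten =
      part ++ ((part :: parts).zip parts).flatMap
        (fun lr => (if optAlnum lr.1.getLast? && optAlnum lr.2.head? then ['\\', '_'] else ['_']) ++ lr.2)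
  | [], part, p, hpart, _, _ => by
    simp [glue, gp_no_underscore part hpart p, flatten_singletons part]
  | q :: qs, part, p, hpart, hparts, hp => by
    have hq : '_' ∉ q := hparts q List.mem_cons_self
    have hqs : ∀ l ∈ qs, '_' ∉ l := fun l hl => hparts l (List.mem_cons_of_mem _ hl)
    have ih := gp_glue qs q (some '_') hq hqs (fun _ => by decide)
    show (gp p (part ++ '_' :: glue (q :: qs))).flatten = _
    rw [gp_append part hpart p ('_' :: glue (q :: qs))]
    simp only [gp]
    rw [List.flatten_append, flatten_singletons part, List.flatten_cons, ih,
        head_glue q qs, lastO_alnum p part hp]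
    simp [List.zip_cons_cons, List.flatMap_cons]

-- ===== VERDICT (by name: the statement is the Claim_ definition above) =====
theorem escape_place_token_py_spec : Claim_equal_escape_place_token_py := by
  intro token _
  unfold Spec_escape_place_token_py escape_place_token_py escape_place_token_py_alt
  split_ifs with he hb
  · rfl
  · rfl
  · have hne : token.toList ≠ [] := by simpa [List.isEmpty_iff] using he
    have hlen : PySem.Str.len token = (token.toList.length : Int) := by
      simp [PySem.Str.len]
    dsimp only
    rw [hlen, pieces_eq token.toList hne, zip_eq_gp token.toList none]
    obtain ⟨p0, rest, hps⟩ := List.exists_cons_of_ne_nil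
      (by simpa [List.splitOn] using List.splitOnP_ne_nil (· == '_') token.toList
        : token.toList.splitOn '_' ≠ [])
    rw [PySem.List.foldl_append_eq_flatMap]
    have hglue := glue_splitOn token.toList
    rw [hps] at hglue
    have hnous := no_underscore_splitOn token.toList
    rw [hps] at hnous
    have := gp_glue rest p0 none (hnous p0 List.mem_cons_self)
      (fun l hl => hnous l (List.mem_cons_of_mem _ hl)) (fun _ => rfl)
    rw [hglue] at this
    have hjoin : PySem.Chars.join ([] : List Char) (gp none token.toList) = (gp none token.toList).flatten :=
      join_nil_flatten _
    rw [hps]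
    simp only [List.headD_cons, List.tail_cons]
    rw [hjoin, this]
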